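-- pv_equiv track=rewrite | github.com/htingwang/HandsOnAlgoDS | LeetCode/1504.Count-Submatrices-With-All-Ones/Count-Submatrices-With-All-Ones.py | numSubmat3
-- ===== SOURCE A (Python) =====
-- def numSubmat3(mat):
--     if not mat or not mat[0]: return 0
--     res = 0
--     m, n = len(mat), len(mat[0])
--     count = [[0] * n for _ in range(m)]
--     stack = [[] for _ in range(n)]
--     for i in range(m):
--         for j in range(n):
--             if j and mat[i][j]: mat[i][j] += mat[i][j - 1]
--             while stack[j] and mat[stack[j][-1]][j] >= mat[i][j]: stack[j].pop()
--             pre_i, pre_count = -1, 0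
--             if stack[j]: pre_i, pre_count = stack[j][-1], count[stack[j][-1]][j]
--             count[i][j] += pre_count + (i - pre_i) * mat[i][j]
--             res += count[i][j]
--             stack[j].append(i)
--     return res
-- ===== SOURCE B (Python) =====
-- def numSubmat3(mat):
--     # Different strategy: build a fresh left-run-width matrix w (no mutation of mat),
--     # then for each column sum running minima over every suffix of the column.
--     if not mat or not mat[0]:
--         return 0
--     n = len(mat[0])
--     w = []
--     for row in mat:
--         wr, prev = [], 0
--         for x in row[:n]:
--             prev = x + prev if x else 0
--             wr.append(prev)
--         w.append(wr)
--     res = 0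
--     for j in range(n):
--         col = [wr[j] for wr in w]
--         while col:
--             cur = col[0]
--             res += cur
--             for x in col[1:]:
--                 cur = min(cur, x)
--                 res += cur
--             col = col[1:]
--     return res
-- ===== Notes on version B (the rewrite author's own statement) =====
-- stated objective: alternative
-- what changed: Replaced the per-column monotonic index stack with in-place mutation of mat by a fresh left-run-width matrix plus, per column, a running-minimum scan over every suffix that sums window minima directly (no stack, no mutation).
import Mathlib
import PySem

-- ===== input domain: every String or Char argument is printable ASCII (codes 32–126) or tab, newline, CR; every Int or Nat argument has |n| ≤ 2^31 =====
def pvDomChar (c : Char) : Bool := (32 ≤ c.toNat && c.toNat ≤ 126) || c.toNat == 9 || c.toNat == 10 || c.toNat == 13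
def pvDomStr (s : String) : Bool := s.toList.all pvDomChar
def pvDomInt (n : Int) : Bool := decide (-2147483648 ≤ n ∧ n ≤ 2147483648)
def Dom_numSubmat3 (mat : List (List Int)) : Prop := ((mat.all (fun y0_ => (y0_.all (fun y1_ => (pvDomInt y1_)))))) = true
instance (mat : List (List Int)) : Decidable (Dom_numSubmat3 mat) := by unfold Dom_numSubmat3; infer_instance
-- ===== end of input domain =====

-- B replaces A's per-column monotonic index stks (and A's in-place mutation of mat, which
-- only affects the argument, not the return value proved about here) by a fresh left-run-width
-- matrix and a per-column running-minimum scan over every column suffix (alternative algorithm).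

-- ===== PORT A =====
-- mat[i][j] read (in range under Pre_; 0 default otherwise)
def pvGet2 (xss : List (List Int)) (i j : Int) : Int :=
  PySem.List.pyGetD (PySem.List.pyGetD xss i []) j 0

-- mat[i][j] = v (indices are the loop counters, nonnegative)
def pvSet2 (xss : List (List Int)) (i j : Int) (v : Int) : List (List Int) :=
  xss.set i.toNat ((xss.getD i.toNat []).set j.toNat v)

-- 'while stack[j] and mat[stack[j][-1]][j] >= mat[i][j]: stack[j].pop()'
-- (the Python stack appends/pops at the END; it is kept here top-first: same contents)
def popWhileA (mat : List (List Int)) (j x : Int) : List Int → List Int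
  | [] => []
  | t :: rest => if x ≤ pvGet2 mat t j then popWhileA mat j x rest else t :: rest

-- 'pre_i, pre_count = -1, 0; if stack[j]: pre_i, pre_count = stack[j][-1], count[stack[j][-1]][j]'
def preA (count : List (List Int)) (j : Int) : List Int → Int × Int
  | [] => (-1, 0)
  | t :: _ => (t, pvGet2 count t j)

-- one body of the inner 'for j in range(n)' loop; state = (mat, count, stack, res)
def stepA (s : List (List Int) × List (List Int) × List (List Int) × Int) (i j : Int) :
    List (List Int) × List (List Int) × List (List Int) × Int :=
  let mat := s.1
  let count := s.2.1
  let stks := s.2.2.1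
  let res := s.2.2.2
  let mat := if j ≠ 0 ∧ pvGet2 mat i j ≠ 0 then
      pvSet2 mat i j (pvGet2 mat i j + pvGet2 mat i (j - 1)) else mat
  let x := pvGet2 mat i j
  let st := popWhileA mat j x (PySem.List.pyGetD stks j [])
  let pre := preA count j st
  let cij := pvGet2 count i j + (pre.2 + (i - pre.1) * x)
  (mat, pvSet2 count i j cij, stks.set j.toNat (i :: st), res + cij)

def numSubmat3 (mat : List (List Int)) : Int :=
  if mat = [] ∨ mat.headD [] = [] then 0
  else
    -- m, n = len(mat), len(mat[0]); count = [[0]*n]*m fresh; stack = [[] for _ in range(n)]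
    ((PySem.List.pyRange 0 (mat.length : Int) 1).foldl (fun s i =>
        (PySem.List.pyRange 0 ((mat.headD []).length : Int) 1).foldl (fun s j => stepA s i j) s)
      (mat, List.replicate mat.length (List.replicate (mat.headD []).length (0 : Int)),
        List.replicate (mat.headD []).length ([] : List Int), (0 : Int))).2.2.2

-- ===== PORT B =====
-- 'for x in row[:n]: prev = x + prev if x else 0; wr.append(prev)'
def altRowB (n : Nat) (row : List Int) : List Int × Int :=
  (PySem.List.slice row none (some (n : Int))).foldl
    (fun (s : List Int × Int) x =>
      let prev := if x ≠ 0 then x + s.2 else 0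
      (s.1 ++ [prev], prev)) ([], 0)

-- 'for x in col[1:]: cur = min(cur, x); res += cur'  (returns (cur, added))
def altRunB (cur : Int) (xs : List Int) : Int × Int :=
  xs.foldl (fun (s : Int × Int) x => (min s.1 x, s.2 + min s.1 x)) (cur, 0)

-- 'while col: cur = col[0]; res += cur; …; col = col[1:]'  (returns the column's added total)
def altWhileB : List Int → Int
  | [] => 0
  | c :: rest => (c + (altRunB c rest).2) + altWhileB rest

def numSubmat3_alt (mat : List (List Int)) : Int :=
  if mat = [] ∨ mat.headD [] = [] then 0
  else
    -- n = len(mat[0]); w built by appending one accumulated row per input row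
    (PySem.List.pyRange 0 ((mat.headD []).length : Int) 1).foldl
      (fun res j => res + altWhileB
        ((mat.foldl (fun acc row => acc ++ [(altRowB (mat.headD []).length row).1]) []).map
          (fun wr => PySem.List.pyGetD wr j 0))) 0

-- ===== PRECONDITION & SPEC =====
-- Pre_ excludes exactly the ragged inputs (a row shorter than the first row), where the
-- Python A raises IndexError (and B raises too).
def Pre_numSubmat3 (mat : List (List Int)) : Prop :=
  ∀ row ∈ mat, (mat.headD []).length ≤ row.length
instance (mat : List (List Int)) : Decidable (Pre_numSubmat3 mat) := by
  unfold Pre_numSubmat3; infer_instance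

def pvWitness_numSubmat3 : List (List Int) := [[1, 0], [1, 1]]

def Spec_numSubmat3 (mat : List (List Int)) (out : Int) : Prop := out = numSubmat3_alt mat
instance (mat : List (List Int)) (out : Int) : Decidable (Spec_numSubmat3 mat out) := by
  unfold Spec_numSubmat3; infer_instance

-- ===== CLAIM (what is proved, stated in full; the proofs are below) =====
def Claim_equal_numSubmat3 : Prop :=
  ∀ (mat : List (List Int)), Dom_numSubmat3 mat → Pre_numSubmat3 mat →
    Spec_numSubmat3 mat (numSubmat3 mat)

-- ===== LEMMAS AND PROOFS =====

/- Reference layer: left-run accumulation, window-minimum sums, and A's column stack machine. -/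

-- left-run accumulation of one row (what A's mutation / B's wr loop both compute)
def accAux (prev : Int) : List Int → List Int
  | [] => []
  | x :: xs => (if x ≠ 0 then x + prev else 0) :: accAux (if x ≠ 0 then x + prev else 0) xs

def accEnd (prev : Int) (xs : List Int) : Int :=
  xs.foldl (fun p x => if x ≠ 0 then x + p else 0) prev

-- column j of the accumulated (height) matrix
def hcol (mat : List (List Int)) (n j : Nat) : List Int :=
  mat.map (fun row => (accAux 0 (row.take n)).getD j 0)

def minAll (c : Int) (xs : List Int) : Int := xs.foldl min c

def runSum (cur : Int) : List Int → Int
  | [] => 0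
  | x :: xs => min cur x + runSum (min cur x) xs

-- B's value for one column
def colSum : List Int → Int
  | [] => 0
  | c :: rest => (c + runSum c rest) + colSum rest

-- sum of the minima of all suffixes (windows ending at the last element)
def endSum : List Int → Int
  | [] => 0
  | x :: xs => minAll x xs + endSum xs

-- A's per-column stack machine, heights read from the fixed column h
def popM (h : List Int) (x : Int) : List (Nat × Int) → List (Nat × Int)
  | [] => []
  | (t, c) :: rest => if x ≤ h.getD t 0 then popM h x rest else (t, c) :: rest

def preOf (st : List (Nat × Int)) : Int × Int :=
  match st with
  | [] => (-1, 0)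
  | (t, c) :: _ => ((t : Int), c)

def stepM (h : List Int) (s : List (Nat × Int) × Int) (p : Nat) : List (Nat × Int) × Int :=
  let x := h.getD p 0
  let st := popM h x s.1
  let c := (preOf st).2 + ((p : Int) - (preOf st).1) * x
  ((p, c) :: st, s.2 + c)

def runM (h : List Int) (p : Nat) : List (Nat × Int) × Int :=
  (List.range p).foldl (stepM h) ([], 0)

-- count recorded for row t of a column (top of the stack right after step t)
def cVal (h : List Int) (t : Nat) : Int :=
  match (runM h (t + 1)).1 with
  | (_, c) :: _ => c
  | [] => 0

-- index bound of a stack (one above its top index)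
def bnd : List (Nat × Int) → Nat
  | [] => 0
  | (t, _) :: _ => t + 1

-- stack invariant: contiguous coverage with gap bounds and correct counts
def Chain (h : List Int) : List (Nat × Int) → Prop
  | [] => True
  | (t, c) :: rest =>
      bnd rest ≤ t ∧ (∀ u, bnd rest ≤ u → u < t → h.getD t 0 ≤ h.getD u 0) ∧
      c = endSum (h.take (t + 1)) ∧ Chain h rest

/- ---- basic facts ---- -/

lemma accAux_length (p : Int) (xs : List Int) : (accAux p xs).length = xs.length := by
  induction xs generalizing p with
  | nil => rfl
  | cons x xs ih => simp [accAux, ih]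

lemma accAux_append (p : Int) (xs ys : List Int) :
    accAux p (xs ++ ys) = accAux p xs ++ accAux (accEnd p xs) ys := by
  induction xs generalizing p with
  | nil => simp [accAux, accEnd]
  | cons x xs ih => simp only [List.cons_append, accAux, ih, accEnd, List.foldl_cons]

lemma accEnd_append (p : Int) (xs ys : List Int) :
    accEnd p (xs ++ ys) = accEnd (accEnd p xs) ys := by
  simp [accEnd, List.foldl_append]

lemma accAux_getD_last (xs : List Int) (p : Int) (h : xs ≠ []) :
    (accAux p xs).getD (xs.length - 1) 0 = accEnd p xs := by
  induction xs using List.reverseRecOn with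
  | nil => simp at h
  | append_singleton ys x ih =>
      rw [accAux_append, accEnd_append]
      simp [accAux, accEnd, List.getD_append_right, accAux_length]

/- ---- endSum / colSum arithmetic ---- -/

lemma minAll_append (c : Int) (xs ys : List Int) :
    minAll c (xs ++ ys) = minAll (minAll c xs) ys := by
  simp [minAll, List.foldl_append]

lemma minAll_eq_self : ∀ (xs : List Int) (c : Int), (∀ y ∈ xs, c ≤ y) → minAll c xs = c := by
  intro xs
  induction xs with
  | nil => intro c _; rfl
  | cons x xs ih =>
      intro c h
      have hx : min c x = c := min_eq_left (h x (by simp))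
      calc minAll c (x :: xs) = minAll (min c x) xs := by simp [minAll]
        _ = min c x := ih _ (fun y hy => by rw [hx]; exact h y (by simp [hy]))
        _ = c := hx

lemma le_minAll : ∀ (xs : List Int) (c b : Int), b ≤ c → (∀ y ∈ xs, b ≤ y) → b ≤ minAll c xs := by
  intro xs
  induction xs with
  | nil => intro c b hb _; exact hb
  | cons x xs ih =>
      intro c b hb h
      calc b ≤ minAll (min c x) xs :=
            ih _ _ (le_min hb (h x (by simp))) (fun y hy => h y (by simp [hy]))
        _ = minAll c (x :: xs) := by simp [minAll]

lemma minAll_le_mem : ∀ (xs : List Int) (c : Int), ∀ y ∈ xs, minAll c xs ≤ y := by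
  intro xs c y hy
  exact (PySem.List.foldl_min_le xs c).2 y hy

lemma runSum_snoc (cur x : Int) (xs : List Int) :
    runSum cur (xs ++ [x]) = runSum cur xs + min (minAll cur xs) x := by
  induction xs generalizing cur with
  | nil => simp [runSum, minAll]
  | cons y xs ih => simp [runSum, minAll, List.foldl_cons, ih]; ring

lemma colSum_snoc (g : List Int) (x : Int) :
    colSum (g ++ [x]) = colSum g + endSum (g ++ [x]) := by
  induction g with
  | nil => simp [colSum, endSum, runSum, minAll]
  | cons y g ih =>
      simp [colSum, endSum, runSum_snoc, ih, minAll_append, minAll]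
      ring

lemma endSum_all_ge (g : List Int) (x : Int) (h : ∀ u ∈ g, x ≤ u) :
    endSum (g ++ [x]) = ((g.length : Int) + 1) * x := by
  induction g with
  | nil => simp [endSum, minAll]
  | cons u g ih =>
      have h1 : minAll u (g ++ [x]) = x := by
        have hx : x ≤ minAll u g :=
          le_minAll g u x (h u (by simp)) (fun y hy => h y (by simp [hy]))
        calc minAll u (g ++ [x]) = min (minAll u g) x := by simp [minAll_append, minAll]
          _ = x := min_eq_right hx
      simp [endSum, h1, ih (fun y hy => h y (by simp [hy]))]
      push_cast; ring

lemma endSum_split (a : List Int) (ht : Int) (b : List Int) (x : Int)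
    (h1 : ht < x) (h2 : ∀ u ∈ b, x ≤ u) :
    endSum (a ++ ht :: b ++ [x]) = endSum (a ++ [ht]) + ((b.length : Int) + 1) * x := by
  induction a with
  | nil =>
      have hm : List.foldl min ht (b ++ [x]) = ht := by
        apply minAll_eq_self
        intro y hy
        rcases List.mem_append.1 hy with hy | hy
        · exact le_of_lt (lt_of_lt_of_le h1 (h2 y hy))
        · simp at hy; omega
      simp only [List.nil_append, List.cons_append, endSum, hm, endSum_all_ge b x h2,
        minAll, List.foldl_nil]
      ring
  | cons y a ih =>
      have hm : minAll y (a ++ ht :: b ++ [x]) = minAll y (a ++ [ht]) := by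
        have hsp : a ++ ht :: b ++ [x] = (a ++ [ht]) ++ (b ++ [x]) := by simp
        have hM : minAll y (a ++ [ht]) ≤ ht :=
          minAll_le_mem (a ++ [ht]) y ht (by simp)
        rw [hsp, minAll_append]
        apply minAll_eq_self
        intro z hz
        rcases List.mem_append.1 hz with hz | hz
        · exact le_trans hM (le_of_lt (lt_of_lt_of_le h1 (h2 z hz)))
        · simp at hz; subst hz; exact le_trans hM (le_of_lt h1)
      simp only [List.cons_append, endSum, ih, hm]
      ring

/- index form of the two endSum step lemmas -/

lemma take_succ_getD (h : List Int) (p : Nat) (hp : p < h.length) :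
    h.take (p + 1) = h.take p ++ [h.getD p 0] := by
  rw [List.take_succ]
  congr 1
  rw [List.getElem?_eq_getElem hp, List.getD_eq_getElem h 0 hp]
  rfl

lemma mem_take_getD (h : List Int) (p : Nat) (y : Int) (hy : y ∈ h.take p) :
    ∃ u, u < p ∧ u < h.length ∧ h.getD u 0 = y := by
  obtain ⟨i, hi, e⟩ := List.mem_iff_getElem.1 hy
  have hi' : i < h.length := lt_of_lt_of_le hi (by simp [List.length_take])
  have hip : i < p := lt_of_lt_of_le hi (by simp [List.length_take])
  refine ⟨i, hip, hi', ?_⟩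
  rw [List.getD_eq_getElem h 0 hi', ← e, List.getElem_take]

lemma mem_drop_take_getD (h : List Int) (a k : Nat) (y : Int)
    (hy : y ∈ (h.drop a).take k) : ∃ u, a ≤ u ∧ u < a + k ∧ h.getD u 0 = y := by
  obtain ⟨i, hik, hilen, e⟩ := mem_take_getD (h.drop a) k y hy
  have hlen : a + i < h.length := by
    rw [List.length_drop] at hilen; omega
  refine ⟨a + i, by omega, by omega, ?_⟩
  rw [← e, List.getD_eq_getElem h 0 hlen,
    List.getD_eq_getElem _ 0 (by rw [List.length_drop]; omega)]
  simp

lemma endSum_step0 (h : List Int) (p : Nat) (hp : p < h.length)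
    (hall : ∀ u, u < p → h.getD p 0 ≤ h.getD u 0) :
    endSum (h.take (p + 1)) = ((p : Int) + 1) * h.getD p 0 := by
  rw [take_succ_getD h p hp]
  rw [endSum_all_ge (h.take p) (h.getD p 0) ?mem]
  case mem =>
    intro y hy
    obtain ⟨u, hu, -, e⟩ := mem_take_getD h p y hy
    rw [← e]; exact hall u hu
  have hl : (h.take p).length = p := by simp [List.length_take]; omega
  rw [hl]

lemma endSum_step (h : List Int) (p t : Nat) (hp : p < h.length) (htp : t < p)
    (hlt : h.getD t 0 < h.getD p 0)
    (hgap : ∀ u, t < u → u < p → h.getD p 0 ≤ h.getD u 0) :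
    endSum (h.take (p + 1)) =
      endSum (h.take (t + 1)) + ((p : Int) - (t : Int)) * h.getD p 0 := by
  have ht' : t < h.length := lt_trans htp hp
  set b : List Int := (h.take p).drop (t + 1) with hbdef
  have e1 : h.take (t + 1) = h.take t ++ [h.getD t 0] := take_succ_getD h t ht'
  have e2 : h.take p = h.take (t + 1) ++ b := by
    rw [hbdef]
    conv_lhs => rw [← List.take_append_drop (t + 1) (h.take p)]
    rw [List.take_take, min_eq_left (by omega : t + 1 ≤ p)]
  have e3 : h.take (p + 1) = h.take p ++ [h.getD p 0] := take_succ_getD h p hp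
  have hblen : b.length = p - (t + 1) := by
    rw [hbdef]; simp [List.length_take]; omega
  have hbmem : ∀ y ∈ b, h.getD p 0 ≤ y := by
    intro y hy
    rw [hbdef, List.drop_take] at hy
    obtain ⟨u, h1, h2, e⟩ := mem_drop_take_getD h (t + 1) (p - (t + 1)) y hy
    rw [← e]
    exact hgap u (by omega) (by omega)
  have hsplit : h.take (p + 1) = h.take t ++ h.getD t 0 :: b ++ [h.getD p 0] := by
    rw [e3, e2, e1]; simp
  rw [hsplit, endSum_split (h.take t) (h.getD t 0) b (h.getD p 0) hlt hbmem, hblen, e1]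
  have hnum : ((p - (t + 1) : Nat) : Int) + 1 = (p : Int) - (t : Int) := by omega
  rw [hnum]

/- ---- stack machine facts ---- -/

lemma runM_succ (h : List Int) (p : Nat) :
    runM h (p + 1) = stepM h (runM h p) p := by
  simp [runM, List.range_succ, List.foldl_append]

lemma runM_succ_eq (h : List Int) (p : Nat) :
    runM h (p + 1) =
      ((p, (preOf (popM h (h.getD p 0) (runM h p).1)).2
            + ((p : Int) - (preOf (popM h (h.getD p 0) (runM h p).1)).1) * h.getD p 0)
         :: popM h (h.getD p 0) (runM h p).1,
       (runM h p).2 + ((preOf (popM h (h.getD p 0) (runM h p).1)).2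
            + ((p : Int) - (preOf (popM h (h.getD p 0) (runM h p).1)).1) * h.getD p 0)) := by
  rw [runM_succ]
  rfl

lemma bnd_popM_le (h : List Int) (x : Int) :
    ∀ st, Chain h st → bnd (popM h x st) ≤ bnd st := by
  intro st
  induction st with
  | nil => intro _; simp [popM]
  | cons e rest ih =>
      obtain ⟨t, c⟩ := e
      intro hc
      by_cases hx : x ≤ h.getD t 0
      · simp only [popM, hx, if_pos]
        calc bnd (popM h x rest) ≤ bnd rest := ih hc.2.2.2
          _ ≤ t + 1 := le_trans hc.1 (Nat.le_succ t)
        -- uses Chain: bnd rest ≤ t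
      · simp only [popM, hx, if_neg, if_false]
        exact le_refl _

lemma popM_chain (h : List Int) (x : Int) (st : List (Nat × Int)) (hc : Chain h st) :
    Chain h (popM h x st) := by
  induction st with
  | nil => exact hc
  | cons e rest ih =>
      obtain ⟨t, c⟩ := e
      by_cases hx : x ≤ h.getD t 0
      · rw [popM, if_pos hx]; exact ih hc.2.2.2
      · rw [popM, if_neg hx]; exact hc

lemma popM_gap (h : List Int) (x : Int) (st : List (Nat × Int)) (hc : Chain h st) :
    ∀ u, bnd (popM h x st) ≤ u → u < bnd st → x ≤ h.getD u 0 := by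
  induction st with
  | nil => intro u h1 h2; simp [bnd] at h2
  | cons e rest ih =>
      obtain ⟨t, c⟩ := e
      by_cases hx : x ≤ h.getD t 0
      · intro u h1 h2
        rw [popM, if_pos hx] at h1
        simp only [bnd] at h2
        by_cases hu : u < bnd rest
        · exact ih hc.2.2.2 u h1 hu
        · by_cases htu : u = t
          · subst htu; exact hx
          · exact le_trans hx (hc.2.1 u (by omega) (by omega))
      · intro u h1 h2
        rw [popM, if_neg hx] at h1
        simp only [bnd] at h1 h2
        omega

lemma popM_head_lt (h : List Int) (x : Int) :
    ∀ (st : List (Nat × Int)) (t : Nat) (c : Int) (r : List (Nat × Int)),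
      popM h x st = (t, c) :: r → h.getD t 0 < x := by
  intro st
  induction st with
  | nil => intro t c r hh; simp [popM] at hh
  | cons e rest ih =>
      obtain ⟨t', c'⟩ := e
      intro t c r hh
      by_cases hx : x ≤ h.getD t' 0
      · rw [popM, if_pos hx] at hh
        exact ih t c r hh
      · rw [popM, if_neg hx] at hh
        have ht : t' = t := by
          have := congrArg (fun l => (l.headD (0, 0)).1) hh
          simpa using this
        subst ht; omega

lemma popM_subset (h : List Int) (x : Int) :
    ∀ (st : List (Nat × Int)) (e : Nat × Int), e ∈ popM h x st → e ∈ st := by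
  intro st
  induction st with
  | nil => intro e he; exact he
  | cons a rest ih =>
      obtain ⟨t, c⟩ := a
      intro e he
      by_cases hx : x ≤ h.getD t 0
      · rw [popM, if_pos hx] at he; exact List.mem_cons_of_mem _ (ih e he)
      · rw [popM, if_neg hx] at he; exact he

lemma chain_inv (h : List Int) : ∀ p, p ≤ h.length →
    Chain h (runM h p).1 ∧ bnd (runM h p).1 = p ∧ (runM h p).2 = colSum (h.take p) := by
  intro p
  induction p with
  | zero => intro _; exact ⟨trivial, rfl, rfl⟩
  | succ p ih =>
      intro hp1
      have hplen : p < h.length := hp1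
      obtain ⟨hch, hb, hres⟩ := ih (Nat.le_of_succ_le hp1)
      have hch' : Chain h (popM h (h.getD p 0) (runM h p).1) :=
        popM_chain h (h.getD p 0) (runM h p).1 hch
      have hble : bnd (popM h (h.getD p 0) (runM h p).1) ≤ p :=
        le_trans (bnd_popM_le h (h.getD p 0) (runM h p).1 hch) (le_of_eq hb)
      have hgap : ∀ u, bnd (popM h (h.getD p 0) (runM h p).1) ≤ u → u < p →
          h.getD p 0 ≤ h.getD u 0 := by
        intro u h1 h2
        exact popM_gap h (h.getD p 0) (runM h p).1 hch u h1 (by rw [hb]; exact h2)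
      cases hpop : popM h (h.getD p 0) (runM h p).1 with
      | nil =>
          rw [runM_succ_eq, hpop]
          simp only [preOf]
          have hc : (0 : Int) + ((p : Int) - (-1)) * h.getD p 0 = endSum (h.take (p + 1)) := by
            rw [endSum_step0 h p hplen (fun u hu => hgap u (by rw [hpop]; exact Nat.zero_le u) hu)]
            ring
          refine ⟨⟨?_, ?_, ?_, trivial⟩, ?_, ?_⟩
          · exact Nat.zero_le p
          · intro u h1 h2
            exact hgap u (by rw [hpop]; exact Nat.zero_le u) h2
          · exact hc
          · rfl
          · rw [hres, take_succ_getD h p hplen, colSum_snoc,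
              ← take_succ_getD h p hplen, ← hc]
      | cons e r =>
          obtain ⟨t, cc⟩ := e
          have htp : t + 1 ≤ p := by rw [hpop] at hble; exact hble
          have hlt : h.getD t 0 < h.getD p 0 := popM_head_lt h _ _ t cc r hpop
          have hcc : cc = endSum (h.take (t + 1)) := by
            rw [hpop] at hch'; exact hch'.2.2.1
          have hgap' : ∀ u, t < u → u < p → h.getD p 0 ≤ h.getD u 0 := by
            intro u h1 h2
            exact hgap u (by rw [hpop]; simpa [bnd] using h1) h2
          have hc : cc + ((p : Int) - (t : Int)) * h.getD p 0 = endSum (h.take (p + 1)) := by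
            rw [hcc, ← endSum_step h p t hplen (by omega) hlt hgap']
          rw [runM_succ_eq, hpop]
          simp only [preOf]
          refine ⟨⟨?_, ?_, ?_, ?_⟩, ?_, ?_⟩
          · exact htp
          · intro u h1 h2
            exact hgap u (by rw [hpop]; simpa [bnd] using h1) h2
          · exact hc
          · rw [← hpop]; exact hch'
          · rfl
          · rw [hres, take_succ_getD h p hplen, colSum_snoc,
              ← take_succ_getD h p hplen, ← hc]

lemma runM_colSum (h : List Int) : (runM h h.length).2 = colSum h := by
  have := (chain_inv h h.length (le_refl _)).2.2
  simpa using this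

lemma entries_lt (h : List Int) : ∀ (p : Nat), ∀ e ∈ (runM h p).1, e.1 < p := by
  intro p
  induction p with
  | zero => intro e he; simp [runM] at he
  | succ p ih =>
      intro e he
      rw [runM_succ] at he
      simp only [stepM] at he
      rcases List.mem_cons.1 he with he | he
      · subst he; omega
      · have := ih e (popM_subset h _ _ e he)
        omega

lemma entries_cVal (h : List Int) : ∀ (p : Nat), ∀ e ∈ (runM h p).1, e.2 = cVal h e.1 := by
  intro p
  induction p with
  | zero => intro e he; simp [runM] at he
  | succ p ih =>
      intro e he
      rw [runM_succ] at he
      simp only [stepM] at he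
      rcases List.mem_cons.1 he with he | he
      · subst he
        simp only [cVal, runM_succ, stepM]
      · exact ih e (popM_subset h _ _ e he)


/- ---- simulation of port A's interleaved fold ---- -/

-- partially accumulated row (columns < j mutated)
def rowSt (j : Nat) (row : List Int) : List Int := accAux 0 (row.take j) ++ row.drop j

-- mat after fully processing rows < i and columns < j of row i
def matSt (M0 : List (List Int)) (n i j : Nat) : List (List Int) :=
  M0.mapIdx (fun k row => if k < i then rowSt n row else if k = i then rowSt j row else row)

def countSt (M0 : List (List Int)) (n i j : Nat) : List (List Int) :=
  (List.range M0.length).map (fun t => (List.range n).map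
    (fun s => if t < i ∨ (t = i ∧ s < j) then cVal (hcol M0 n s) t else 0))

def stkSt (M0 : List (List Int)) (n i j : Nat) : List (List Int) :=
  (List.range n).map (fun s =>
    ((runM (hcol M0 n s) (if s < j then i + 1 else i)).1).map (fun e => (e.1 : Int)))

def resSt (M0 : List (List Int)) (n i j : Nat) : Int :=
  ((List.range n).map (fun s => (runM (hcol M0 n s) (if s < j then i + 1 else i)).2)).sum

def stA (M0 : List (List Int)) (n i j : Nat) :
    List (List Int) × List (List Int) × List (List Int) × Int :=
  (matSt M0 n i j, countSt M0 n i j, stkSt M0 n i j, resSt M0 n i j)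

lemma pvGet2_natCast (xss : List (List Int)) (i j : Nat) :
    pvGet2 xss (i : Int) (j : Int) = (xss.getD i []).getD j 0 := by
  simp [pvGet2]

lemma getD_drop (row : List Int) (j k : Nat) : (row.drop j).getD k 0 = row.getD (j + k) 0 := by
  by_cases h : j + k < row.length
  · rw [List.getD_eq_getElem _ _ (by rw [List.length_drop]; omega),
      List.getD_eq_getElem _ _ h, List.getElem_drop]
  · rw [List.getD_eq_default _ _ (by rw [List.length_drop]; omega),
      List.getD_eq_default _ _ (by omega)]

lemma length_accAux_take (row : List Int) (j : Nat) (hj : j ≤ row.length) :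
    (accAux 0 (row.take j)).length = j := by
  rw [accAux_length, List.length_take]; omega

lemma rowSt_getD_lt (row : List Int) (j s : Nat) (hs : s < j) (hj : j ≤ row.length) :
    (rowSt j row).getD s 0 = (accAux 0 (row.take j)).getD s 0 := by
  unfold rowSt
  rw [List.getD_append _ _ 0 s (by rw [length_accAux_take row j hj]; omega)]

lemma rowSt_getD_ge (row : List Int) (j s : Nat) (hs : j ≤ s) (hj : j ≤ row.length) :
    (rowSt j row).getD s 0 = row.getD s 0 := by
  unfold rowSt
  rw [List.getD_append_right _ _ 0 s (by rw [length_accAux_take row j hj]; omega),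
    length_accAux_take row j hj, getD_drop]
  congr 1
  omega

lemma length_hcol (M0 : List (List Int)) (n j : Nat) : (hcol M0 n j).length = M0.length := by
  simp [hcol]

lemma hcol_getD (M0 : List (List Int)) (n j t : Nat) (ht : t < M0.length) :
    (hcol M0 n j).getD t 0 = (accAux 0 ((M0.getD t []).take n)).getD j 0 := by
  unfold hcol
  rw [List.getD_eq_getElem _ 0 (by simpa using ht), List.getElem_map,
    List.getD_eq_getElem _ [] ht]

lemma accAux_take_prefix (row : List Int) (a b s : Nat) (hab : a ≤ b) (hs : s < a)
    (ha : a ≤ row.length) :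
    (accAux 0 (row.take a)).getD s 0 = (accAux 0 (row.take b)).getD s 0 := by
  have hsplit : row.take b = row.take a ++ ((row.take b).drop a) := by
    conv_lhs => rw [← List.take_append_drop a (row.take b)]
    rw [List.take_take, min_eq_left hab]
  rw [hsplit, accAux_append,
    List.getD_append _ _ 0 s (by rw [length_accAux_take row a ha]; omega)]

lemma matSt_getD (M0 : List (List Int)) (n i j k : Nat) (hk : k < M0.length) :
    (matSt M0 n i j).getD k [] =
      (if k < i then rowSt n (M0.getD k []) else if k = i then rowSt j (M0.getD k [])
        else M0.getD k []) := by
  unfold matSt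
  rw [List.getD_eq_getElem _ [] (by simpa using hk), List.getElem_mapIdx,
    List.getD_eq_getElem _ [] hk]

lemma cVal_succ (h : List Int) (p : Nat) :
    cVal h p = (preOf (popM h (h.getD p 0) (runM h p).1)).2
      + ((p : Int) - (preOf (popM h (h.getD p 0) (runM h p).1)).1) * h.getD p 0 := by
  unfold cVal
  rw [runM_succ_eq]

lemma runM1_succ (h : List Int) (p : Nat) :
    (runM h (p + 1)).1 = (p, cVal h p) :: popM h (h.getD p 0) (runM h p).1 := by
  rw [runM_succ_eq, cVal_succ]

lemma runM2_succ (h : List Int) (p : Nat) :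
    (runM h (p + 1)).2 = (runM h p).2 + cVal h p := by
  rw [runM_succ_eq, cVal_succ]

-- one slot of a range-indexed sum changes
lemma sum_map_range_update (n j : Nat) (f g : Nat → Int) (c : Int) (hj : j < n)
    (hne : ∀ s, s ≠ j → g s = f s) (hjv : g j = f j + c) :
    ((List.range n).map g).sum = ((List.range n).map f).sum + c := by
  induction n with
  | zero => omega
  | succ n ih =>
      rw [List.range_succ, List.map_append, List.map_append, List.sum_append, List.sum_append]
      by_cases hjn : j = n
      · subst hjn
        have : ∀ s ∈ List.range j, g s = f s := fun s hs => hne s (by simp at hs; omega)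
        rw [List.map_congr_left this]
        simp [hjv]
        ring
      · rw [ih (by omega)]
        simp [hne n (by omega)]
        ring

lemma rowSt_succ (row : List Int) (j : Nat) (hj : j < row.length) :
    rowSt (j + 1) row = (rowSt j row).set j
      (if row.getD j 0 ≠ 0 then row.getD j 0 + accEnd 0 (row.take j) else 0) := by
  have e1 : row.take (j + 1) = row.take j ++ [row.getD j 0] := take_succ_getD row j hj
  have e2 : row.drop j = row.getD j 0 :: row.drop (j + 1) := by
    rw [List.drop_eq_getElem_cons hj, List.getD_eq_getElem _ _ hj]
  show accAux 0 (row.take (j + 1)) ++ row.drop (j + 1) = _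
  rw [e1, accAux_append]
  conv_rhs => rw [rowSt, e2]
  have hlen : (accAux 0 (row.take j)).length = j := length_accAux_take row j (by omega)
  rw [List.set_append]
  rw [if_neg (by rw [hlen]; omega)]
  rw [show j - (accAux 0 (row.take j)).length = 0 from by rw [hlen]; omega]
  simp [accAux, List.append_assoc]

lemma rowSt_self (row : List Int) (j : Nat) (hj : j < row.length)
    (hz : row.getD j 0 = 0 ∨ j = 0) :
    rowSt (j + 1) row = rowSt j row := by
  rw [rowSt_succ row j hj]
  have hv : (if row.getD j 0 ≠ 0 then row.getD j 0 + accEnd 0 (row.take j) else 0)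
      = (rowSt j row).getD j 0 := by
    rw [rowSt_getD_ge row j j (le_refl j) (by omega)]
    rcases hz with hz | hz
    · have hz' : row[j]?.getD 0 = 0 := hz
      simp [hz']
    · subst hz
      simp [accEnd]
      intro h; exact h.symm
  rw [hv, List.getD_eq_getElem _ _ (by unfold rowSt; rw [List.length_append, length_accAux_take row j (by omega), List.length_drop]; omega),
    List.set_getElem_self]

lemma mat_step (M0 : List (List Int)) (n : Nat) (hpre : ∀ row ∈ M0, n ≤ row.length)
    (i j : Nat) (hi : i < M0.length) (hj : j < n) :
    (if (j : Int) ≠ 0 ∧ pvGet2 (matSt M0 n i j) (i : Int) (j : Int) ≠ 0 then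
        pvSet2 (matSt M0 n i j) (i : Int) (j : Int)
          (pvGet2 (matSt M0 n i j) (i : Int) (j : Int) +
            pvGet2 (matSt M0 n i j) (i : Int) ((j : Int) - 1))
      else matSt M0 n i j) = matSt M0 n i (j + 1) := by
  have hrow : M0.getD i [] ∈ M0 := by
    rw [List.getD_eq_getElem _ [] hi]; exact List.getElem_mem _
  have hrn : n ≤ (M0.getD i []).length := hpre _ hrow
  have hjr : j < (M0.getD i []).length := by omega
  have hrowi : (matSt M0 n i j).getD i [] = rowSt j (M0.getD i []) := by
    rw [matSt_getD M0 n i j i hi]; simp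
  have hread : pvGet2 (matSt M0 n i j) (i : Int) (j : Int) = (M0.getD i []).getD j 0 := by
    rw [pvGet2_natCast, hrowi, rowSt_getD_ge _ j j (le_refl j) (by omega)]
  have hset : ∀ v, pvSet2 (matSt M0 n i j) (i : Int) (j : Int) v
      = (matSt M0 n i j).set i ((rowSt j (M0.getD i [])).set j v) := by
    intro v
    simp only [pvSet2, Int.toNat_natCast]
    rw [hrowi]
  have hmatset : ∀ r', (matSt M0 n i j).set i r'
      = M0.mapIdx (fun k row => if k < i then rowSt n row else if k = i then r' else row) := by
    intro r'
    apply List.ext_getElem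
    · simp [matSt]
    · intro k h1 h2
      simp only [matSt, List.getElem_set, List.getElem_mapIdx]
      by_cases hk : k = i
      · subst hk; simp
      · simp [hk]
        intro h
        exact absurd h.symm hk
  by_cases hc : (j : Int) ≠ 0 ∧ pvGet2 (matSt M0 n i j) (i : Int) (j : Int) ≠ 0
  · rw [if_pos hc]
    have hj0 : j ≠ 0 := by
      intro h; exact hc.1 (by simp [h])
    have hx0 : (M0.getD i []).getD j 0 ≠ 0 := by rw [← hread]; exact hc.2
    have hprev : pvGet2 (matSt M0 n i j) (i : Int) ((j : Int) - 1)
        = accEnd 0 ((M0.getD i []).take j) := by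
      have hco : ((j : Int) - 1) = ((j - 1 : Nat) : Int) := by omega
      rw [hco, pvGet2_natCast, hrowi, rowSt_getD_lt _ j (j - 1) (by omega) (by omega)]
      have hjlen : ((M0.getD i []).take j).length = j := by rw [List.length_take]; omega
      have := accAux_getD_last ((M0.getD i []).take j) 0
        (by intro h; rw [h] at hjlen; simp at hjlen; omega)
      rw [List.length_take, min_eq_left (by omega)] at this
      exact this
    rw [hread, hprev, hset]
    rw [hmatset]
    have : rowSt (j + 1) (M0.getD i []) = (rowSt j (M0.getD i [])).set j
        ((M0.getD i []).getD j 0 + accEnd 0 ((M0.getD i []).take j)) := by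
      rw [rowSt_succ _ j hjr, if_pos hx0]
    rw [← this]
    apply List.ext_getElem
    · simp [matSt]
    · intro k h1 h2
      simp only [matSt, List.getElem_mapIdx]
      by_cases hk : k = i
      · subst hk
        simp [List.getElem?_eq_getElem hi]
      · simp [hk]
  · rw [if_neg hc]
    have hz : (M0.getD i []).getD j 0 = 0 ∨ j = 0 := by
      by_cases hj0 : j = 0
      · right; exact hj0
      · left
        by_contra hxx
        exact hc ⟨by simpa using hj0, by rw [hread]; exact hxx⟩
    have hr : rowSt (j + 1) (M0.getD i []) = rowSt j (M0.getD i []) := rowSt_self _ j hjr hz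
    apply List.ext_getElem
    · simp [matSt]
    · intro k h1 h2
      simp only [matSt, List.getElem_mapIdx]
      by_cases hk : k = i
      · subst hk
        rw [List.getD_eq_getElem M0 [] hi] at hr
        simp [List.getElem?_eq_getElem hi, hr]
      · simp [hk]

lemma matN_cell_lt (M0 : List (List Int)) (n : Nat) (hpre : ∀ row ∈ M0, n ≤ row.length)
    (i j t : Nat) (hi : i < M0.length) (hj : j < n) (ht : t < i) :
    pvGet2 (matSt M0 n i (j + 1)) (t : Int) (j : Int) = (hcol M0 n j).getD t 0 := by
  have htm : t < M0.length := by omega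
  have hrn : n ≤ (M0.getD t []).length := by
    apply hpre
    rw [List.getD_eq_getElem _ [] htm]; exact List.getElem_mem _
  rw [pvGet2_natCast, matSt_getD M0 n i (j + 1) t htm, if_pos ht,
    rowSt_getD_lt _ n j hj (by omega), hcol_getD M0 n j t htm]

lemma matN_cell_ii (M0 : List (List Int)) (n : Nat) (hpre : ∀ row ∈ M0, n ≤ row.length)
    (i j : Nat) (hi : i < M0.length) (hj : j < n) :
    pvGet2 (matSt M0 n i (j + 1)) (i : Int) (j : Int) = (hcol M0 n j).getD i 0 := by
  have hrn : n ≤ (M0.getD i []).length := by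
    apply hpre
    rw [List.getD_eq_getElem _ [] hi]; exact List.getElem_mem _
  rw [pvGet2_natCast, matSt_getD M0 n i (j + 1) i hi, if_neg (lt_irrefl i), if_pos rfl]
  rw [rowSt_getD_lt _ (j + 1) j (by omega) (by omega),
    accAux_take_prefix _ (j + 1) n j (by omega) (by omega) (by omega),
    hcol_getD M0 n j i hi]

lemma popWhile_corr (M0 : List (List Int)) (n : Nat) (hpre : ∀ row ∈ M0, n ≤ row.length)
    (i j : Nat) (hi : i < M0.length) (hj : j < n) (x : Int) :
    ∀ st : List (Nat × Int), (∀ e ∈ st, e.1 < i) →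
      popWhileA (matSt M0 n i (j + 1)) (j : Int) x (st.map (fun e => ((e.1 : Nat) : Int)))
        = (popM (hcol M0 n j) x st).map (fun e => ((e.1 : Nat) : Int)) := by
  intro st
  induction st with
  | nil => intro _; rfl
  | cons e rest ih =>
      obtain ⟨t, c⟩ := e
      intro hlt
      have hcell : pvGet2 (matSt M0 n i (j + 1)) (t : Int) (j : Int)
          = (hcol M0 n j).getD t 0 :=
        matN_cell_lt M0 n hpre i j t hi hj (hlt (t, c) (by simp))
      by_cases hx : x ≤ (hcol M0 n j).getD t 0
      · rw [List.map_cons, popWhileA, if_pos (by rw [hcell]; exact hx), popM, if_pos hx]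
        exact ih (fun e he => hlt e (by simp [he]))
      · rw [List.map_cons, popWhileA, if_neg (by rw [hcell]; exact hx), popM, if_neg hx,
          List.map_cons]

lemma stk_read (M0 : List (List Int)) (n i j : Nat) (hj : j < n) :
    PySem.List.pyGetD (stkSt M0 n i j) (j : Int) []
      = ((runM (hcol M0 n j) i).1).map (fun e => ((e.1 : Nat) : Int)) := by
  rw [PySem.List.pyGetD_natCast]
  unfold stkSt
  rw [List.getD_eq_getElem _ [] (by simpa using hj), List.getElem_map, List.getElem_range]
  simp

lemma count_read (M0 : List (List Int)) (n i j t : Nat) (htm : t < M0.length) (hj : j < n)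
    (ht : t < i) :
    pvGet2 (countSt M0 n i j) (t : Int) (j : Int) = cVal (hcol M0 n j) t := by
  rw [pvGet2_natCast]
  unfold countSt
  rw [List.getD_eq_getElem _ [] (by simpa using htm), List.getElem_map, List.getElem_range,
    List.getD_eq_getElem _ 0 (by simpa using hj), List.getElem_map, List.getElem_range,
    if_pos (Or.inl ht)]

lemma count_read_ii (M0 : List (List Int)) (n i j : Nat) (hi : i < M0.length) (hj : j < n) :
    pvGet2 (countSt M0 n i j) (i : Int) (j : Int) = 0 := by
  rw [pvGet2_natCast]
  unfold countSt
  rw [List.getD_eq_getElem _ [] (by simpa using hi), List.getElem_map, List.getElem_range,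
    List.getD_eq_getElem _ 0 (by simpa using hj), List.getElem_map, List.getElem_range,
    if_neg (by omega)]

lemma count_set (M0 : List (List Int)) (n i j : Nat) (hi : i < M0.length) (hj : j < n) :
    pvSet2 (countSt M0 n i j) (i : Int) (j : Int) (cVal (hcol M0 n j) i)
      = countSt M0 n i (j + 1) := by
  simp only [pvSet2, Int.toNat_natCast]
  have hgetD : (countSt M0 n i j).getD i []
      = (List.range n).map (fun s => if i < i ∨ (i = i ∧ s < j) then cVal (hcol M0 n s) i else 0) := by
    unfold countSt
    rw [List.getD_eq_getElem _ [] (by simpa using hi), List.getElem_map, List.getElem_range]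
  rw [hgetD]
  apply List.ext_getElem
  · simp [countSt]
  · intro t h1 h2
    have htm : t < M0.length := by simpa [countSt] using h2
    simp only [countSt, List.getElem_set, List.getElem_map, List.getElem_range]
    by_cases ht : i = t
    · subst ht
      rw [if_pos rfl]
      apply List.ext_getElem
      · simp
      · intro s hs1 hs2
        simp only [List.getElem_set, List.getElem_map, List.getElem_range]
        simp only [lt_irrefl, false_or, true_and]
        split_ifs with h1 h2 h3 <;> first | rfl | omega | (rw [h1])
    · rw [if_neg ht]
      apply List.map_congr_left
      intro s hs
      by_cases hti : t < i
      · rw [if_pos (by omega : t < i ∨ (t = i ∧ s < j)),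
          if_pos (by omega : t < i ∨ (t = i ∧ s < j + 1))]
      · rw [if_neg (by omega), if_neg (by omega)]

lemma stk_set (M0 : List (List Int)) (n i j : Nat) (hi : i < M0.length) (hj : j < n) :
    (stkSt M0 n i j).set j ((i : Int) ::
        (popM (hcol M0 n j) ((hcol M0 n j).getD i 0) (runM (hcol M0 n j) i).1).map
          (fun e => ((e.1 : Nat) : Int)))
      = stkSt M0 n i (j + 1) := by
  apply List.ext_getElem
  · simp [stkSt]
  · intro s h1 h2
    simp only [stkSt, List.getElem_set, List.getElem_map, List.getElem_range]
    by_cases hs : j = s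
    · subst hs
      rw [if_pos rfl, if_pos (by omega), runM1_succ]
      simp
    · rw [if_neg hs]
      by_cases hsj : s < j
      · rw [if_pos (by omega), if_pos (by omega)]
      · rw [if_neg (by omega), if_neg (by omega)]

lemma res_set (M0 : List (List Int)) (n i j : Nat) (hj : j < n) :
    resSt M0 n i j + cVal (hcol M0 n j) i = resSt M0 n i (j + 1) := by
  unfold resSt
  rw [sum_map_range_update n j
    (fun s => (runM (hcol M0 n s) (if s < j then i + 1 else i)).2)
    (fun s => (runM (hcol M0 n s) (if s < j + 1 then i + 1 else i)).2)
    (cVal (hcol M0 n j) i) hj ?hne ?hjv]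
  case hne =>
    intro s hs
    have hif : (if s < j + 1 then i + 1 else i) = (if s < j then i + 1 else i) := by
      by_cases hsj : s < j
      · rw [if_pos (by omega : s < j + 1), if_pos hsj]
      · rw [if_neg (by omega : ¬ s < j + 1), if_neg hsj]
    simp only [hif]
  case hjv =>
    have h1 : (if j < j + 1 then i + 1 else i) = i + 1 := if_pos (by omega)
    have h2 : (if j < j then i + 1 else i) = i := if_neg (by omega)
    simp only [h1, h2, runM2_succ]

lemma stepA_sim (M0 : List (List Int)) (n : Nat) (hpre : ∀ row ∈ M0, n ≤ row.length)
    (i j : Nat) (hi : i < M0.length) (hj : j < n) :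
    stepA (stA M0 n i j) (i : Int) (j : Int) = stA M0 n i (j + 1) := by
  have hmat := mat_step M0 n hpre i j hi hj
  have hx := matN_cell_ii M0 n hpre i j hi hj
  have hstk := stk_read M0 n i j hj
  have hpopc := popWhile_corr M0 n hpre i j hi hj ((hcol M0 n j).getD i 0)
    (runM (hcol M0 n j) i).1 (entries_lt (hcol M0 n j) i)
  simp only [stepA, stA]
  rw [hmat, hx, hstk, hpopc]
  rw [count_read_ii M0 n i j hi hj]
  simp only [Int.toNat_natCast]
  cases hpp : popM (hcol M0 n j) ((hcol M0 n j).getD i 0) (runM (hcol M0 n j) i).1 with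
  | nil =>
      simp only [List.map_nil, preA]
      have hcv : (0 : Int) + ((0 : Int) + ((i : Int) - (-1)) * (hcol M0 n j).getD i 0)
          = cVal (hcol M0 n j) i := by
        rw [cVal_succ, hpp]
        simp [preOf]
      rw [hcv, count_set M0 n i j hi hj, res_set M0 n i j hj]
      have hss := stk_set M0 n i j hi hj
      rw [hpp] at hss
      simp only [List.map_nil] at hss
      rw [hss]
  | cons e r =>
      obtain ⟨t, cc⟩ := e
      have htl : t < i := entries_lt (hcol M0 n j) i (t, cc)
        (popM_subset (hcol M0 n j) _ _ (t, cc) (by rw [hpp]; simp))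
      simp only [List.map_cons, preA]
      rw [count_read (M0 := M0) (n := n) i j t (by omega) hj htl]
      have hcv : (0 : Int) + (cVal (hcol M0 n j) t + ((i : Int) - (t : Int)) * (hcol M0 n j).getD i 0)
          = cVal (hcol M0 n j) i := by
        have hcc : cc = cVal (hcol M0 n j) t := entries_cVal (hcol M0 n j) i (t, cc)
          (popM_subset (hcol M0 n j) _ _ (t, cc) (by rw [hpp]; simp))
        conv_rhs => rw [cVal_succ, hpp]
        simp only [preOf, hcc]
        ring
      rw [hcv, count_set M0 n i j hi hj, res_set M0 n i j hj]
      have hss := stk_set M0 n i j hi hj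
      rw [hpp] at hss
      simp only [List.map_cons] at hss
      rw [hss]

lemma stA_wrap (M0 : List (List Int)) (n i : Nat) : stA M0 n i n = stA M0 n (i + 1) 0 := by
  unfold stA
  simp only [Prod.mk.injEq]
  refine ⟨?_, ?_, ?_, ?_⟩
  · apply List.ext_getElem
    · simp [matSt]
    · intro k h1 h2
      simp only [matSt, List.getElem_mapIdx]
      by_cases h3 : k < i
      · rw [if_pos h3, if_pos (by omega)]
      · by_cases h4 : k = i
        · rw [if_neg h3, if_pos h4, if_pos (by omega)]
        · rw [if_neg h3, if_neg h4, if_neg (by omega)]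
          by_cases h5 : k = i + 1
          · rw [if_pos h5]
            rfl
          · rw [if_neg h5]
  · unfold countSt
    apply List.map_congr_left
    intro t _
    apply List.map_congr_left
    intro s hs
    have hs' : s < n := by simpa using hs
    by_cases h3 : t < i + 1
    · rw [if_pos (by omega : t < i ∨ (t = i ∧ s < n)),
        if_pos (by omega : t < i + 1 ∨ (t = i + 1 ∧ s < 0))]
    · rw [if_neg (by omega : ¬(t < i ∨ (t = i ∧ s < n))),
        if_neg (by omega : ¬(t < i + 1 ∨ (t = i + 1 ∧ s < 0)))]
  · unfold stkSt
    apply List.map_congr_left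
    intro s hs
    have hs' : s < n := by simpa using hs
    rw [if_pos hs', if_neg (by omega)]
  · unfold resSt
    congr 1
    apply List.map_congr_left
    intro s hs
    have hs' : s < n := by simpa using hs
    rw [if_pos hs', if_neg (by omega)]

lemma stA_zero (M0 : List (List Int)) (n : Nat) :
    stA M0 n 0 0 = (M0, List.replicate M0.length (List.replicate n (0 : Int)),
      List.replicate n ([] : List Int), (0 : Int)) := by
  unfold stA
  simp only [Prod.mk.injEq]
  refine ⟨?_, ?_, ?_, ?_⟩
  · apply List.ext_getElem
    · simp [matSt]
    · intro k h1 h2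
      simp only [matSt, List.getElem_mapIdx]
      rw [if_neg (by omega)]
      by_cases h3 : k = 0
      · rw [if_pos h3]; rfl
      · rw [if_neg h3]
  · apply List.ext_getElem
    · simp [countSt]
    · intro t h1 h2
      simp only [countSt, List.getElem_map, List.getElem_range, List.getElem_replicate]
      apply List.ext_getElem
      · simp
      · intro s hs1 hs2
        simp only [List.getElem_map, List.getElem_range, List.getElem_replicate]
        rw [if_neg (by omega)]
  · apply List.ext_getElem
    · simp [stkSt]
    · intro s h1 h2
      simp only [stkSt, List.getElem_map, List.getElem_range, List.getElem_replicate]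
      rw [if_neg (by omega)]
      rfl
  · unfold resSt
    have : ∀ s ∈ List.range n, (runM (hcol M0 n s) (if s < 0 then 0 + 1 else 0)).2 = 0 := by
      intro s _
      rw [if_neg (by omega)]
      rfl
    rw [List.map_congr_left this]
    simp

lemma inner_fold (M0 : List (List Int)) (n : Nat) (hpre : ∀ row ∈ M0, n ≤ row.length)
    (i : Nat) (hi : i < M0.length) : ∀ j, j ≤ n →
    (PySem.List.pyRange 0 (j : Int) 1).foldl (fun s jj => stepA s (i : Int) jj)
        (stA M0 n i 0) = stA M0 n i j := by
  intro j
  induction j with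
  | zero => intro _; rw [PySem.List.pyRange_one_eq_nil (by omega)]; rfl
  | succ j ih =>
      intro hj1
      have : ((j : Int) + 1) = ((j + 1 : Nat) : Int) := by push_cast; ring
      rw [← this, PySem.List.pyRange_one_succ_right (by omega), List.foldl_append,
        ih (by omega)]
      simpa using stepA_sim M0 n hpre i j hi (by omega)

lemma outer_fold (M0 : List (List Int)) (n : Nat) (hpre : ∀ row ∈ M0, n ≤ row.length) :
    ∀ i, i ≤ M0.length →
    (PySem.List.pyRange 0 (i : Int) 1).foldl (fun s ii =>
        (PySem.List.pyRange 0 (n : Int) 1).foldl (fun s jj => stepA s ii jj) s)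
      (stA M0 n 0 0) = stA M0 n i 0 := by
  intro i
  induction i with
  | zero =>
      intro _
      rw [show PySem.List.pyRange 0 ((0 : Nat) : Int) 1 = [] from
        PySem.List.pyRange_one_eq_nil (by omega)]
      rfl
  | succ i ih =>
      intro hi1
      have hcast : ((i : Int) + 1) = ((i + 1 : Nat) : Int) := by push_cast; ring
      rw [← hcast, PySem.List.pyRange_one_succ_right (by omega), List.foldl_append,
        ih (by omega)]
      simp only [List.foldl_cons, List.foldl_nil]
      rw [inner_fold M0 n hpre i (by omega) n (le_refl n), stA_wrap]

-- A's value on a non-degenerate input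
lemma portA_value (M0 : List (List Int)) (hpre : ∀ row ∈ M0, (M0.headD []).length ≤ row.length)
    (hg : ¬(M0 = [] ∨ M0.headD [] = [])) :
    numSubmat3 M0 = ((List.range (M0.headD []).length).map
      (fun s => colSum (hcol M0 (M0.headD []).length s))).sum := by
  unfold numSubmat3
  rw [if_neg hg]
  rw [← stA_zero M0 (M0.headD []).length,
    outer_fold M0 (M0.headD []).length hpre M0.length (le_refl _)]
  show resSt M0 (M0.headD []).length M0.length 0 = _
  unfold resSt
  apply congrArg
  apply List.map_congr_left
  intro s _
  rw [if_neg (by omega)]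
  have hl : (hcol M0 (M0.headD []).length s).length = M0.length := length_hcol _ _ _
  rw [← hl, runM_colSum]

/- ---- port B's value ---- -/

lemma altRowB_fold (xs : List Int) : ∀ (acc : List Int) (p : Int),
    xs.foldl (fun (s : List Int × Int) x =>
      let prev := if x ≠ 0 then x + s.2 else 0
      (s.1 ++ [prev], prev)) (acc, p) = (acc ++ accAux p xs, accEnd p xs) := by
  induction xs with
  | nil => intro acc p; simp [accAux, accEnd]
  | cons x xs ih =>
      intro acc p
      simp only [List.foldl_cons, ih, accAux, accEnd, List.foldl_cons]
      simp [List.append_assoc]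

lemma altRowB_fst (n : Nat) (row : List Int) : (altRowB n row).1 = accAux 0 (row.take n) := by
  unfold altRowB
  rw [PySem.List.slice_to_natCast, altRowB_fold]
  simp

lemma altRunB_fold (xs : List Int) : ∀ (cur acc : Int),
    xs.foldl (fun (s : Int × Int) x => (min s.1 x, s.2 + min s.1 x)) (cur, acc)
      = (minAll cur xs, acc + runSum cur xs) := by
  induction xs with
  | nil => intro cur acc; simp [minAll, runSum]
  | cons x xs ih =>
      intro cur acc
      simp only [List.foldl_cons, ih, minAll, runSum, List.foldl_cons]
      rw [add_assoc]

lemma altRunB_snd (cur : Int) (xs : List Int) : (altRunB cur xs).2 = runSum cur xs := by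
  unfold altRunB
  rw [altRunB_fold]
  simp

lemma altWhileB_eq_colSum (l : List Int) : altWhileB l = colSum l := by
  induction l with
  | nil => rfl
  | cons c rest ih => simp [altWhileB, colSum, altRunB_snd, ih]

lemma portB_value (M0 : List (List Int)) (hpre : ∀ row ∈ M0, (M0.headD []).length ≤ row.length)
    (hg : ¬(M0 = [] ∨ M0.headD [] = [])) :
    numSubmat3_alt M0 = ((List.range (M0.headD []).length).map
      (fun s => colSum (hcol M0 (M0.headD []).length s))).sum := by
  unfold numSubmat3_alt
  rw [if_neg hg]
  rw [PySem.List.foldl_append_singleton_eq_map, List.nil_append]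
  rw [PySem.List.pyRange_zero_natCast, List.foldl_map, PySem.List.foldl_add]
  rw [Int.zero_add]
  apply congrArg
  apply List.map_congr_left
  intro s hs
  have hs' : s < (M0.headD []).length := by simpa using hs
  rw [altWhileB_eq_colSum]
  apply congrArg
  rw [List.map_map]
  unfold hcol
  apply List.map_congr_left
  intro row _
  simp [altRowB_fst]

-- ===== VERDICT (by name: the statement is the Claim_ definition above) =====
theorem numSubmat3_spec : Claim_equal_numSubmat3 := by
  intro mat _ hpre
  unfold Spec_numSubmat3
  by_cases hg : mat = [] ∨ mat.headD [] = []
  · rw [numSubmat3, numSubmat3_alt, if_pos hg, if_pos hg]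
  · rw [portA_value mat hpre hg, portB_value mat hpre hg]
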